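-- pv_equiv track=rewrite | github.com/Sharad2001/Data-structures-and-algorithms | minimum_indexed_character.py | minIndexChar
-- ===== SOURCE A (Python) =====
-- def minIndexChar(Str, pat):
--     d = {}
--     for i in Str:
--         d[i] = 1
--     for j in pat:
--         d[j] = 2
--     for i in range(len(Str)):
--         if d[Str[i]] == 2:
--             return i
--     return -1
-- ===== SOURCE B (Python) =====
-- def minIndexChar(Str, pat):
--     candidates = [Str.index(c) for c in pat if c in Str]
--     return min(candidates) if candidates else -1
-- ===== Notes on version B (the rewrite author's own statement) =====
-- stated objective: simpler
-- what changed: Instead of marking every character in a dict and then forward-scanning Str index by index, B collects the first-occurrence index of each pat character that occurs in Str and returns the minimum (or -1 if none occurs).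
import Mathlib
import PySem

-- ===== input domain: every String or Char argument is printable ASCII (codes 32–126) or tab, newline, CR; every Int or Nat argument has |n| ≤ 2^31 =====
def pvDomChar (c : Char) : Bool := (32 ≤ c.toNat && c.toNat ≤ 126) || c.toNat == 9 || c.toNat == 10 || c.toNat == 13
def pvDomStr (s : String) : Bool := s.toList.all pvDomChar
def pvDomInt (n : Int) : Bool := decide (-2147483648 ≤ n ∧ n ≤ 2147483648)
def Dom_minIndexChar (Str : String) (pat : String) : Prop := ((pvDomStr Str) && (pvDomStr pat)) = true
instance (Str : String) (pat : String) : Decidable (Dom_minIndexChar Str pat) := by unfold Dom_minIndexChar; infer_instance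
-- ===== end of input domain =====

-- B replaces A's mark-a-dict-then-forward-scan with: take the first-occurrence index of each
-- pat character present in Str and return their minimum (-1 if none occurs); same results, simpler.

-- ===== PORT A =====
-- the 'for i in range(len(Str)): if d[Str[i]] == 2: return i' loop with its early return;
-- i is always in range and Str[i] is always a key of d, so the two .getD defaults are unreachable
def minIndexCharLoop (s : List Char) (d : PySem.Dict Char Int) : List Int → Int
  | [] => -1
  | i :: rest =>
    if d.getD ((PySem.List.pyGet? s i).getD ' ') 0 == 2 then i
    else minIndexCharLoop s d rest

def minIndexChar (Str : String) (pat : String) : Int :=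
  let s := Str.toList
  let d := s.foldl (fun d c => d.insert c (1 : Int)) PySem.Dict.empty
  let d := pat.toList.foldl (fun d c => d.insert c (2 : Int)) d
  minIndexCharLoop s d (PySem.List.pyRange 0 s.length 1)

-- ===== PORT B =====
-- single-character 'c in Str' / 'Str.index(c)' are ported as char-list membership / first-occurrence
-- index? (exact for one-character needles); the .getD 0 is unreachable under the membership guard
def minIndexChar_alt (Str : String) (pat : String) : Int :=
  let s := Str.toList
  let candidates : List Int :=
    (pat.toList.filter (fun c => decide (c ∈ s))).map
      (fun c => ((PySem.List.index? s c).getD 0 : Int))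
  match PySem.List.min? candidates (fun x => x) with
  | some m => m
  | none => -1

-- ===== PRECONDITION & SPEC =====
def Spec_minIndexChar (Str : String) (pat : String) (out : Int) : Prop := out = minIndexChar_alt Str pat
instance (Str : String) (pat : String) (out : Int) : Decidable (Spec_minIndexChar Str pat out) := by unfold Spec_minIndexChar; infer_instance

-- ===== CLAIM (what is proved, stated in full; the proofs are below) =====
def Claim_equal_minIndexChar : Prop := ∀ (Str : String) (pat : String), Dom_minIndexChar Str pat → Spec_minIndexChar Str pat (minIndexChar Str pat)

-- ===== LEMMAS AND PROOFS =====

-- value of a key after a constant-value insertion fold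
theorem get?_foldl_insert_const (xs : List Char) (d : PySem.Dict Char Int) (v : Int) (c : Char) :
    (xs.foldl (fun d x => d.insert x v) d).get? c = if c ∈ xs then some v else d.get? c := by
  induction xs generalizing d with
  | nil => simp
  | cons x t ih =>
    simp only [List.foldl_cons, ih, PySem.Dict.get?_insert, List.mem_cons]
    by_cases ht : c ∈ t <;> by_cases hx : c = x <;> simp [ht, hx]

-- the final dict of A maps every character of s to 2 if it is in p, else 1
theorem dictA_getD (s p : List Char) (c : Char) (hc : c ∈ s) :
    (p.foldl (fun d x => d.insert x (2 : Int))
      (s.foldl (fun d x => d.insert x (1 : Int)) PySem.Dict.empty)).getD c 0 =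
    if c ∈ p then 2 else 1 := by
  unfold PySem.Dict.getD
  rw [get?_foldl_insert_const, get?_foldl_insert_const]
  by_cases hp : c ∈ p <;> simp [hp, hc]

-- A's scan over pyRange pre.length s.length returns pre.length + (first index of suf hit by q)
theorem loop_spec (s : List Char) (d : PySem.Dict Char Int) (q : Char → Bool)
    (hd : ∀ c ∈ s, (d.getD c 0 == 2) = q c) :
    ∀ (suf pre : List Char), s = pre ++ suf →
      minIndexCharLoop s d (PySem.List.pyRange (pre.length : Int) (s.length : Int) 1) =
        (match suf.findIdx? q with
         | some j => ((pre.length + j : Nat) : Int)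
         | none => -1) := by
  intro suf
  induction suf with
  | nil =>
    intro pre h
    have : (s.length : Int) ≤ (pre.length : Int) := by simp [h]
    rw [PySem.List.pyRange_one_eq_nil this]
    simp [minIndexCharLoop]
  | cons c t ih =>
    intro pre h
    have hlt : (pre.length : Int) < (s.length : Int) := by
      simp only [h, List.length_append, List.length_cons]
      push_cast
      omega
    rw [PySem.List.pyRange_one_cons hlt]
    have hget : PySem.List.pyGet? s (pre.length : Int) = some c := by
      rw [h]; exact PySem.List.pyGet?_append_length pre t c
    have hcs : c ∈ s := by rw [h]; simp
    simp only [minIndexCharLoop, hget, Option.getD_some, hd c hcs, List.findIdx?_cons]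
    by_cases hq : q c = true
    · simp [hq]
    · have hqf : q c = false := by simpa using hq
      have h' : s = (pre ++ [c]) ++ t := by simp [h]
      have ih' := ih (pre ++ [c]) h'
      have hlen : ((pre ++ [c]).length : Int) = (pre.length : Int) + 1 := by simp
      rw [hlen] at ih'
      rw [hqf]
      simp only [Bool.false_eq_true, if_false, ih']
      cases hfi : t.findIdx? q
      · simp
      · simp only [Option.map_some]
        simp only [List.length_append, List.length_cons, List.length_nil]
        push_cast
        ring

-- A computes the first index of s whose character lies in p
theorem minIndexChar_eq_findIdx (Str pat : String) :
    minIndexChar Str pat =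
      (match Str.toList.findIdx? (fun c => decide (c ∈ pat.toList)) with
       | some j => (j : Int)
       | none => -1) := by
  unfold minIndexChar
  have hd : ∀ c ∈ Str.toList,
      (((pat.toList.foldl (fun d x => d.insert x (2 : Int))
        (Str.toList.foldl (fun d x => d.insert x (1 : Int)) PySem.Dict.empty)).getD c 0) == 2)
        = decide (c ∈ pat.toList) := by
    intro c hc
    rw [dictA_getD _ _ _ hc]
    by_cases hp : c ∈ pat.toList <;> simp [hp]
  have := loop_spec Str.toList _ _ hd Str.toList [] (by simp)
  simpa using this

-- B computes the same first index
theorem minIndexChar_alt_core (s p : List Char) :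
    (match PySem.List.min?
        ((p.filter (fun c => decide (c ∈ s))).map (fun c => ((PySem.List.index? s c).getD 0 : Int)))
        (fun x => x) with
     | some m => m
     | none => -1) =
      (match s.findIdx? (fun c => decide (c ∈ p)) with
       | some j => (j : Int)
       | none => -1) := by
  cases hfi : s.findIdx? (fun c => decide (c ∈ p)) with
  | none =>
    have hnone : ∀ c ∈ s, c ∉ p := by
      intro c hc
      have := List.findIdx?_eq_none_iff.mp hfi c hc
      simpa using this
    have hfil : p.filter (fun c => decide (c ∈ s)) = [] := by
      rw [List.filter_eq_nil_iff]
      intro c hc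
      simp only [decide_eq_true_eq]
      intro hcs
      exact hnone c hcs hc
    simp [hfil, PySem.List.min?]
  | some i =>
    obtain ⟨hi, hqi, hmin⟩ := List.findIdx?_eq_some_iff_getElem.mp hfi
    have hqi' : s[i] ∈ p := by simpa using hqi
    have hmin' : ∀ j (hj : j < s.length), s[j] ∈ p → i ≤ j := by
      intro j hj hjp
      by_contra hlt
      exact hmin j (by omega) (by simpa using hjp)
    have hidx : PySem.List.index? s s[i] = some i := by
      have hmem : s[i] ∈ s := List.getElem_mem hi
      have hsome : (PySem.List.index? s s[i]).isSome := (PySem.List.index?_isSome_iff s s[i]).mpr hmem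
      obtain ⟨k, hk⟩ := Option.isSome_iff_exists.mp hsome
      obtain ⟨hkl, hkv, hkmin⟩ := PySem.List.getElem_of_index?_eq_some hk
      have h1 : i ≤ k := hmin' k hkl (by rw [hkv]; exact hqi')
      have h2 : ¬ i < k := fun hik => hkmin i hik rfl
      have : k = i := by omega
      rw [hk, this]
    set candidates : List Int :=
      (p.filter (fun c => decide (c ∈ s))).map (fun c => ((PySem.List.index? s c).getD 0 : Int))
      with hcand
    have hmemc : (i : Int) ∈ candidates := by
      rw [hcand]
      refine List.mem_map.mpr ⟨s[i], List.mem_filter.mpr ⟨hqi', by simp [List.getElem_mem hi]⟩, ?_⟩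
      rw [hidx]; rfl
    have hlb : ∀ y ∈ candidates, (i : Int) ≤ y := by
      intro y hy
      rw [hcand] at hy
      obtain ⟨c, hcf, hcy⟩ := List.mem_map.mp hy
      obtain ⟨hcp, hcs⟩ := List.mem_filter.mp hcf
      have hcs' : c ∈ s := by simpa using hcs
      have hsome : (PySem.List.index? s c).isSome := (PySem.List.index?_isSome_iff s c).mpr hcs'
      obtain ⟨k, hk⟩ := Option.isSome_iff_exists.mp hsome
      obtain ⟨hkl, hkv, _⟩ := PySem.List.getElem_of_index?_eq_some hk
      have : i ≤ k := hmin' k hkl (by rw [hkv]; simpa using hcp)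
      rw [← hcy, hk]
      simp only [Option.getD_some]
      exact_mod_cast this
    have hne : candidates ≠ [] := fun hnil => by rw [hnil] at hmemc; exact absurd hmemc List.not_mem_nil
    obtain ⟨m, hm⟩ : ∃ m, PySem.List.min? candidates (fun x => x) = some m := by
      cases hmo : PySem.List.min? candidates (fun x => x) with
      | none => exact absurd ((PySem.List.min?_eq_none_iff _ _).mp hmo) hne
      | some m => exact ⟨m, rfl⟩
    have h1 : (i : Int) ≤ m := hlb m (PySem.List.min?_mem hm)
    have h2 : m ≤ (i : Int) := PySem.List.min?_isMin hm _ hmemc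
    rw [hm]
    simp only
    omega

-- B computes the same first index
theorem minIndexChar_alt_eq_findIdx (Str pat : String) :
    minIndexChar_alt Str pat =
      (match Str.toList.findIdx? (fun c => decide (c ∈ pat.toList)) with
       | some j => (j : Int)
       | none => -1) := by
  have := minIndexChar_alt_core Str.toList pat.toList
  simpa [minIndexChar_alt] using this

-- ===== VERDICT (by name: the statement is the Claim_ definition above) =====
theorem minIndexChar_spec : Claim_equal_minIndexChar := by
  intro Str pat _
  unfold Spec_minIndexChar
  rw [minIndexChar_eq_findIdx, minIndexChar_alt_eq_findIdx]
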